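-- pv_equiv track=rewrite | github.com/PurkkaKoodari/physcalc | physcalc/unit.py | _cancel_unit_parts
-- ===== SOURCE A (Python) =====
-- from collections import Counter, OrderedDict, defaultdict
-- from typing import Iterable, Tuple, List, Dict, TypeVar, Optional, Set, Mapping, DefaultDict
--
-- T = TypeVar("T")
--
-- def _cancel_unit_parts(num: Iterable[T], denom: Iterable[T]) -> Tuple[Tuple[T, ...], Tuple[T, ...]]:
--     """Simplifies a numerator-denumerator pair."""
--     counts = Counter(num)
--     counts.subtract(denom)
--     num_list = []
--     denom_list = []
--     for item, count in sorted(counts.items()):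
--         for _ in range(count):
--             num_list.append(item)
--         for _ in range(-count):
--             denom_list.append(item)
--     return tuple(num_list), tuple(denom_list)
-- ===== SOURCE B (Python) =====
-- def _cancel_unit_parts(num, denom):
--     """Simplifies a numerator-denumerator pair."""
--     ns = sorted(num)
--     ds = sorted(denom)
--     i = j = 0
--     num_list = []
--     denom_list = []
--     while i < len(ns) and j < len(ds):
--         if ns[i] == ds[j]:
--             i += 1
--             j += 1
--         elif ns[i] < ds[j]:
--             num_list.append(ns[i])
--             i += 1
--         else:
--             denom_list.append(ds[j])
--             j += 1
--     num_list.extend(ns[i:])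
--     denom_list.extend(ds[j:])
--     return tuple(num_list), tuple(denom_list)
-- ===== Notes on version B (the rewrite author's own statement) =====
-- stated objective: alternative
-- what changed: Replaces the Counter build/subtract plus sorted-items replication with sorting both lists and cancelling common elements by a two-pointer merge; no count table is ever built.
import Mathlib
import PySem

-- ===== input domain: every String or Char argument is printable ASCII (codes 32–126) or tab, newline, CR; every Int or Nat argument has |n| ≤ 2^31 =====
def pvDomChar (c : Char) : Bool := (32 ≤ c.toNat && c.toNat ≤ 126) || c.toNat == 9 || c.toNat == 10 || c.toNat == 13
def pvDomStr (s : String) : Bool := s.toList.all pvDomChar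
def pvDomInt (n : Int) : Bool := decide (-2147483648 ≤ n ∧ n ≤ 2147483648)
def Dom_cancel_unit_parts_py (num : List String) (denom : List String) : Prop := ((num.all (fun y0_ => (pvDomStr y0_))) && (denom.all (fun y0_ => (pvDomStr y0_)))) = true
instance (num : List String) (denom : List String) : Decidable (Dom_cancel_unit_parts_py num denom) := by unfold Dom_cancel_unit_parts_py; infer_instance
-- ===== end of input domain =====

-- B changes the algorithm: instead of a Counter that is built, subtracted and re-expanded,
-- B sorts both lists and cancels common elements with a two-pointer merge (objective: alternative).

-- ===== PORT A =====
-- counts = Counter(num); counts.subtract(denom)  (subtract: counts[d] = counts.get(d, 0) - 1 per element)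
def pvCountsA (num denom : List String) : PySem.Dict String Int :=
  denom.foldl (fun d x => d.modify x 0 (· - 1)) (PySem.Dict.counter num)

-- the loop body: 'for _ in range(count): num_list.append(item)' appends max(count,0) copies
-- (range of a negative count is empty), rendered with List.replicate count.toNat.
-- sorted(counts.items()) sorts (item, count) tuples; dict keys are distinct, so Python's tuple
-- comparison never reaches the counts: sorting by the first component is exact.
def cancel_unit_parts_py (num : List String) (denom : List String) : List String × List String :=
  let counts := pvCountsA num denom
  (PySem.List.sorted counts.items (fun p => p.1) false).foldl
    (fun (acc : List String × List String) p =>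
      (acc.1 ++ List.replicate p.2.toNat p.1, acc.2 ++ List.replicate (-p.2).toNat p.1))
    ([], [])

-- ===== PORT B =====
-- the while loop over indices i, j: consuming a head = advancing the index;
-- the two trailing extends are the base cases' '++ remainder'.
def pvMergeLoop : List String → List String → List String → List String → List String × List String
  | [], ds, numl, denl => (numl ++ [], denl ++ ds)
  | n :: ns, [], numl, denl => (numl ++ (n :: ns), denl ++ [])
  | n :: ns, d :: ds, numl, denl =>
    if n = d then pvMergeLoop ns ds numl denl
    else if n < d then pvMergeLoop ns (d :: ds) (numl ++ [n]) denl
    else pvMergeLoop (n :: ns) ds numl (denl ++ [d])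

def cancel_unit_parts_py_alt (num : List String) (denom : List String) : List String × List String :=
  pvMergeLoop (PySem.List.sorted num (fun x => x) false) (PySem.List.sorted denom (fun x => x) false) [] []

-- ===== PRECONDITION & SPEC =====
def Spec_cancel_unit_parts_py (num : List String) (denom : List String) (out : List String × List String) : Prop := out = cancel_unit_parts_py_alt num denom
instance (num : List String) (denom : List String) (out : List String × List String) : Decidable (Spec_cancel_unit_parts_py num denom out) := by unfold Spec_cancel_unit_parts_py; infer_instance

-- ===== CLAIM (what is proved, stated in full; the proofs are below) =====
def Claim_equal_cancel_unit_parts_py : Prop := ∀ (num : List String) (denom : List String), Dom_cancel_unit_parts_py num denom → Spec_cancel_unit_parts_py num denom (cancel_unit_parts_py num denom)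

-- ===== LEMMAS AND PROOFS =====
-- pure (cons-building) form of the merge loop, for the proofs
def pvMC : List String → List String → List String × List String
  | [], ds => ([], ds)
  | n :: ns, [] => (n :: ns, [])
  | n :: ns, d :: ds =>
    if n = d then pvMC ns ds
    else if n < d then
      let r := pvMC ns (d :: ds); (n :: r.1, r.2)
    else
      let r := pvMC (n :: ns) ds; (r.1, d :: r.2)

lemma pvMergeLoop_eq (ns ds numl denl : List String) :
    pvMergeLoop ns ds numl denl = (numl ++ (pvMC ns ds).1, denl ++ (pvMC ns ds).2) := by
  fun_induction pvMergeLoop ns ds numl denl with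
  | case1 ds numl denl => simp [pvMC]
  | case2 n ns numl denl => simp [pvMC]
  | case3 ns d ds numl denl ih => simp only [pvMC]; exact ih
  | case4 n ns d ds numl denl h1 h2 ih =>
      simp only [pvMC, if_neg h1, if_pos h2]
      rw [ih, List.append_assoc]
      rfl
  | case5 n ns d ds numl denl h1 h2 ih =>
      simp only [pvMC, if_neg h1, if_neg h2]
      rw [ih, List.append_assoc]
      rfl

lemma pvMC_mem_fst (ns ds : List String) (x : String) (h : x ∈ (pvMC ns ds).1) : x ∈ ns := by
  fun_induction pvMC ns ds with
  | case1 ds => simp at h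
  | case2 n ns => exact h
  | case3 ns d ds ih => exact List.mem_cons_of_mem _ (ih h)
  | case4 n ns d ds h1 h2 r ih =>
      rcases List.mem_cons.mp h with h | h
      · simp [h]
      · exact List.mem_cons_of_mem _ (ih h)
  | case5 n ns d ds h1 h2 r ih => exact ih h

lemma pvMC_mem_snd (ns ds : List String) (x : String) (h : x ∈ (pvMC ns ds).2) : x ∈ ds := by
  fun_induction pvMC ns ds with
  | case1 ds => exact h
  | case2 n ns => simp at h
  | case3 ns d ds ih => exact List.mem_cons_of_mem _ (ih h)
  | case4 n ns d ds h1 h2 r ih => exact ih h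
  | case5 n ns d ds h1 h2 r ih =>
      rcases List.mem_cons.mp h with h | h
      · simp [h]
      · exact List.mem_cons_of_mem _ (ih h)

lemma pvMC_pairwise_fst (ns ds : List String) (hn : ns.Pairwise (· ≤ ·))
    (hd : ds.Pairwise (· ≤ ·)) : (pvMC ns ds).1.Pairwise (· ≤ ·) := by
  fun_induction pvMC ns ds with
  | case1 ds => simp
  | case2 n ns => exact hn
  | case3 ns d ds ih => exact ih (List.Pairwise.of_cons hn) (List.Pairwise.of_cons hd)
  | case4 n ns d ds h1 h2 r ih =>
      show (n :: (pvMC ns (d :: ds)).1).Pairwise (· ≤ ·)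
      refine List.pairwise_cons.mpr ⟨?_, ih (List.Pairwise.of_cons hn) hd⟩
      intro y hy
      exact (List.pairwise_cons.mp hn).1 y (pvMC_mem_fst _ _ _ hy)
  | case5 n ns d ds h1 h2 r ih => exact ih hn (List.Pairwise.of_cons hd)

lemma pvMC_pairwise_snd (ns ds : List String) (hn : ns.Pairwise (· ≤ ·))
    (hd : ds.Pairwise (· ≤ ·)) : (pvMC ns ds).2.Pairwise (· ≤ ·) := by
  fun_induction pvMC ns ds with
  | case1 ds => exact hd
  | case2 n ns => simp
  | case3 ns d ds ih => exact ih (List.Pairwise.of_cons hn) (List.Pairwise.of_cons hd)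
  | case4 n ns d ds h1 h2 r ih => exact ih (List.Pairwise.of_cons hn) hd
  | case5 n ns d ds h1 h2 r ih =>
      show (d :: (pvMC (n :: ns) ds).2).Pairwise (· ≤ ·)
      refine List.pairwise_cons.mpr ⟨?_, ih hn (List.Pairwise.of_cons hd)⟩
      intro y hy
      exact (List.pairwise_cons.mp hd).1 y (pvMC_mem_snd _ _ _ hy)

lemma pvNotMemOfLtHead (n d : String) (ds : List String) (hlt : n < d)
    (hd : (d :: ds).Pairwise (· ≤ ·)) : n ∉ d :: ds := by
  intro hmem
  rcases List.mem_cons.mp hmem with h | h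
  · exact absurd h (ne_of_lt hlt)
  · exact absurd rfl (ne_of_lt (lt_of_lt_of_le hlt ((List.pairwise_cons.mp hd).1 n h)))

lemma pvMC_count_fst (ns ds : List String) (hn : ns.Pairwise (· ≤ ·)) (hd : ds.Pairwise (· ≤ ·))
    (s : String) : List.count s (pvMC ns ds).1 = List.count s ns - List.count s ds := by
  fun_induction pvMC ns ds with
  | case1 ds => simp
  | case2 n ns => simp
  | case3 ns d ds ih =>
      show List.count s (pvMC ns ds).1 = List.count s (d :: ns) - List.count s (d :: ds)
      rw [ih (List.Pairwise.of_cons hn) (List.Pairwise.of_cons hd)]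
      simp only [List.count_cons]
      omega
  | case4 n ns d ds h1 h2 r ih =>
      show List.count s (n :: (pvMC ns (d :: ds)).1) = List.count s (n :: ns) - List.count s (d :: ds)
      rw [List.count_cons, List.count_cons, ih (List.Pairwise.of_cons hn) hd]
      by_cases hsn : n = s
      · have : List.count s (d :: ds) = 0 :=
          List.count_eq_zero.mpr (hsn ▸ pvNotMemOfLtHead _ _ _ h2 hd)
        simp [hsn, this]
      · simp only [beq_iff_eq, hsn, if_false]
        omega
  | case5 n ns d ds h1 h2 r ih =>
      have hdn : d < n := lt_of_le_of_ne (le_of_not_gt h2) (Ne.symm h1)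
      show List.count s (pvMC (n :: ns) ds).1 = List.count s (n :: ns) - List.count s (d :: ds)
      rw [ih hn (List.Pairwise.of_cons hd)]
      by_cases hsd : d = s
      · have : List.count s (n :: ns) = 0 :=
          List.count_eq_zero.mpr (hsd ▸ pvNotMemOfLtHead _ _ _ hdn hn)
        simp [this]
      · simp only [List.count_cons, beq_iff_eq, hsd, if_false]
        omega

lemma pvMC_count_snd (ns ds : List String) (hn : ns.Pairwise (· ≤ ·)) (hd : ds.Pairwise (· ≤ ·))
    (s : String) : List.count s (pvMC ns ds).2 = List.count s ds - List.count s ns := by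
  fun_induction pvMC ns ds with
  | case1 ds => simp
  | case2 n ns => simp
  | case3 ns d ds ih =>
      show List.count s (pvMC ns ds).2 = List.count s (d :: ds) - List.count s (d :: ns)
      rw [ih (List.Pairwise.of_cons hn) (List.Pairwise.of_cons hd)]
      simp only [List.count_cons]
      omega
  | case4 n ns d ds h1 h2 r ih =>
      show List.count s (pvMC ns (d :: ds)).2 = List.count s (d :: ds) - List.count s (n :: ns)
      rw [ih (List.Pairwise.of_cons hn) hd]
      by_cases hsn : n = s
      · have : List.count s (d :: ds) = 0 :=
          List.count_eq_zero.mpr (hsn ▸ pvNotMemOfLtHead _ _ _ h2 hd)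
        simp [this]
      · simp only [List.count_cons, beq_iff_eq, hsn, if_false]
        omega
  | case5 n ns d ds h1 h2 r ih =>
      have hdn : d < n := lt_of_le_of_ne (le_of_not_gt h2) (Ne.symm h1)
      show List.count s (d :: (pvMC (n :: ns) ds).2) = List.count s (d :: ds) - List.count s (n :: ns)
      rw [List.count_cons, List.count_cons, ih hn (List.Pairwise.of_cons hd)]
      by_cases hsd : d = s
      · have : List.count s (n :: ns) = 0 :=
          List.count_eq_zero.mpr (hsd ▸ pvNotMemOfLtHead _ _ _ hdn hn)
        simp [hsd, this]
      · simp only [beq_iff_eq, hsd, if_false]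
        omega

-- ===== A-side characterisation =====

lemma pvSubD_getD (l : List String) (d : PySem.Dict String Int) (k : String) :
    (l.foldl (fun d x => d.modify x 0 (· - 1)) d).getD k 0 = d.getD k 0 - List.count k l := by
  induction l generalizing d with
  | nil => simp
  | cons x xs ih =>
      simp only [List.foldl_cons, ih, PySem.Dict.getD_modify, List.count_cons, beq_iff_eq]
      by_cases h : k = x
      · subst h
        simp only [if_true]
        push_cast
        omega
      · rw [if_neg h, if_neg (fun hh => h hh.symm)]
        push_cast
        omega

lemma pvCountsA_getD (num denom : List String) (k : String) :
    (pvCountsA num denom).getD k 0 = (List.count k num : Int) - List.count k denom := by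
  simp [pvCountsA, pvSubD_getD, PySem.Dict.getD_counter]

lemma pvCountsA_keys (num denom : List String) :
    (pvCountsA num denom).keys = PySem.Set.ofList (num ++ denom) := by
  rw [pvCountsA, PySem.Dict.keys_foldl_modify denom 0 (fun _ _ v => v - 1),
    PySem.Dict.keys_counter, PySem.Set.ofList_append]

lemma pvSortedItems (num denom : List String) :
    PySem.List.sorted (pvCountsA num denom).items (fun p => p.1) =
      (PySem.List.sorted (PySem.Set.ofList (num ++ denom)) (fun x => x)).map
        (fun k => (k, (List.count k num : Int) - List.count k denom)) := by
  have hnd : (pvCountsA num denom).keys.Nodup := by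
    rw [pvCountsA_keys]; exact PySem.Set.nodup_ofList _
  have hperm : ((PySem.List.sorted (PySem.Set.ofList (num ++ denom)) (fun x => x)).map
      (fun k => (k, (List.count k num : Int) - List.count k denom))).Perm
        (pvCountsA num denom).items := by
    rw [PySem.Dict.items_eq_map_keys _ hnd 0, pvCountsA_keys,
      List.map_congr_left (fun k _ => by simp only []; rw [pvCountsA_getD] :
        ∀ k ∈ PySem.Set.ofList (num ++ denom), (fun j => (j, (pvCountsA num denom).getD j 0)) k =
          (fun j => (j, (List.count j num : Int) - List.count j denom)) k)]
    exact (PySem.List.sorted_perm (PySem.Set.ofList (num ++ denom)) (fun x => x) false).map _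
  have hpair : (((PySem.List.sorted (PySem.Set.ofList (num ++ denom)) (fun x => x)).map
      (fun k => (k, (List.count k num : Int) - List.count k denom)))).Pairwise
        (fun a b => a.1 < b.1) := by
    rw [List.pairwise_map]
    exact PySem.List.sorted_ofList_pairwise_lt _
  exact PySem.List.sorted_eq_of_perm_of_pairwise_lt _ _ (fun p => p.1) hperm hpair

lemma pvFoldlPair (S : List (String × Int)) (a b : List String) :
    S.foldl (fun (acc : List String × List String) p =>
        (acc.1 ++ List.replicate p.2.toNat p.1, acc.2 ++ List.replicate (-p.2).toNat p.1)) (a, b) =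
      (a ++ S.flatMap (fun p => List.replicate p.2.toNat p.1),
       b ++ S.flatMap (fun p => List.replicate (-p.2).toNat p.1)) := by
  induction S generalizing a b with
  | nil => simp
  | cons p S ih => simp [ih, List.append_assoc]

lemma pvCountFlat (ks : List String) (f : String → Nat) (s : String) (hnd : ks.Nodup) :
    List.count s (ks.flatMap (fun k => List.replicate (f k) k)) = if s ∈ ks then f s else 0 := by
  induction ks with
  | nil => simp
  | cons k ks ih =>
      simp only [List.flatMap_cons, List.count_append, List.count_replicate,
        ih (List.nodup_cons.mp hnd).2, List.mem_cons]
      by_cases h : s = k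
      · subst h
        simp [(List.nodup_cons.mp hnd).1]
      · simp [h]
        exact fun hh => absurd hh.symm h

lemma pvPairwiseFlat (ks : List String) (f : String → Nat) (h : ks.Pairwise (· < ·)) :
    (ks.flatMap (fun k => List.replicate (f k) k)).Pairwise (· ≤ ·) := by
  induction ks with
  | nil => simp
  | cons k ks ih =>
      simp only [List.flatMap_cons]
      apply List.pairwise_append.mpr
      refine ⟨List.pairwise_replicate.mpr (Or.inr le_rfl), ih (List.Pairwise.of_cons h), ?_⟩
      intro x hx y hy
      rcases List.mem_flatMap.mp hy with ⟨k', hk', hyk'⟩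
      rw [List.eq_of_mem_replicate hx, List.eq_of_mem_replicate hyk']
      exact le_of_lt ((List.pairwise_cons.mp h).1 k' hk')

lemma pvA_eq (num denom : List String) :
    cancel_unit_parts_py num denom =
      ((PySem.List.sorted (PySem.Set.ofList (num ++ denom)) (fun x => x)).flatMap
         (fun k => List.replicate (List.count k num - List.count k denom) k),
       (PySem.List.sorted (PySem.Set.ofList (num ++ denom)) (fun x => x)).flatMap
         (fun k => List.replicate (List.count k denom - List.count k num) k)) := by
  rw [cancel_unit_parts_py]
  simp only [pvSortedItems, pvFoldlPair, List.nil_append, List.flatMap_map]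
  congr 1 <;> apply List.flatMap_congr <;> intro k _ <;> congr 1 <;> omega

lemma pvComponent_eq (A B : List String)
    (hcount : ∀ s, List.count s A = List.count s B)
    (hA : A.Pairwise (· ≤ ·)) (hB : B.Pairwise (· ≤ ·)) : A = B := by
  refine List.Perm.eq_of_pairwise (fun a b _ _ hab hba => le_antisymm hab hba) hA hB ?_
  exact List.perm_iff_count.mpr hcount

lemma pvKeysNodup (num denom : List String) :
    (PySem.List.sorted (PySem.Set.ofList (num ++ denom)) (fun x => x)).Nodup :=
  (PySem.List.sorted_ofList_pairwise_lt _).imp ne_of_lt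

lemma pvCountA_fst (num denom : List String) (s : String) :
    List.count s (cancel_unit_parts_py num denom).1 = List.count s num - List.count s denom := by
  rw [pvA_eq, pvCountFlat _ _ _ (pvKeysNodup num denom)]
  by_cases h : s ∈ PySem.List.sorted (PySem.Set.ofList (num ++ denom)) (fun x => x)
  · simp [h]
  · rw [PySem.List.mem_sorted, PySem.Set.mem_ofList, List.mem_append] at h
    have h1 : s ∉ num := fun hh => h (Or.inl hh)
    have h2 : s ∉ denom := fun hh => h (Or.inr hh)
    rw [if_neg (by rw [PySem.List.mem_sorted, PySem.Set.mem_ofList, List.mem_append]; tauto),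
      List.count_eq_zero.mpr h1, List.count_eq_zero.mpr h2]

lemma pvCountA_snd (num denom : List String) (s : String) :
    List.count s (cancel_unit_parts_py num denom).2 = List.count s denom - List.count s num := by
  rw [pvA_eq, pvCountFlat _ _ _ (pvKeysNodup num denom)]
  by_cases h : s ∈ PySem.List.sorted (PySem.Set.ofList (num ++ denom)) (fun x => x)
  · simp [h]
  · rw [PySem.List.mem_sorted, PySem.Set.mem_ofList, List.mem_append] at h
    have h1 : s ∉ num := fun hh => h (Or.inl hh)
    have h2 : s ∉ denom := fun hh => h (Or.inr hh)
    rw [if_neg (by rw [PySem.List.mem_sorted, PySem.Set.mem_ofList, List.mem_append]; tauto),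
      List.count_eq_zero.mpr h1, List.count_eq_zero.mpr h2]

lemma pvA_pairwise_fst (num denom : List String) :
    (cancel_unit_parts_py num denom).1.Pairwise (· ≤ ·) := by
  rw [pvA_eq]
  exact pvPairwiseFlat _ _ (PySem.List.sorted_ofList_pairwise_lt _)

lemma pvA_pairwise_snd (num denom : List String) :
    (cancel_unit_parts_py num denom).2.Pairwise (· ≤ ·) := by
  rw [pvA_eq]
  exact pvPairwiseFlat _ _ (PySem.List.sorted_ofList_pairwise_lt _)

-- ===== VERDICT (by name: the statement is the Claim_ definition above) =====
theorem cancel_unit_parts_py_spec : Claim_equal_cancel_unit_parts_py := by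
  intro num denom _
  unfold Spec_cancel_unit_parts_py
  have hn := PySem.List.sorted_pairwise num (fun x => x)
  have hd := PySem.List.sorted_pairwise denom (fun x => x)
  have hcn : ∀ s, List.count s (PySem.List.sorted num (fun x => x)) = List.count s num :=
    fun s => (PySem.List.sorted_perm num (fun x => x) false).count_eq s
  have hcd : ∀ s, List.count s (PySem.List.sorted denom (fun x => x)) = List.count s denom :=
    fun s => (PySem.List.sorted_perm denom (fun x => x) false).count_eq s
  rw [cancel_unit_parts_py_alt, pvMergeLoop_eq]
  simp only [List.nil_append]
  refine Prod.ext ?_ ?_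
  · exact pvComponent_eq _ _
      (fun s => by rw [pvCountA_fst, pvMC_count_fst _ _ hn hd, hcn, hcd])
      (pvA_pairwise_fst num denom) (pvMC_pairwise_fst _ _ hn hd)
  · exact pvComponent_eq _ _
      (fun s => by rw [pvCountA_snd, pvMC_count_snd _ _ hn hd, hcn, hcd])
      (pvA_pairwise_snd num denom) (pvMC_pairwise_snd _ _ hn hd)
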